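-- pv_equiv track=rewrite | github.com/SamWood-26/Marker-Genes-to-cell-type | noLLM_analysis.py | classify_species_from_genes
-- ===== SOURCE A (Python) =====
-- def classify_species_from_genes(gene_list):
--     if not gene_list:
--         return "Unknown"
--
--     # Clean up genes: remove commas, whitespace, and check alphanumeric
--     filtered = [g.strip().replace(",", "") for g in gene_list if g.strip().replace(",", "").isalnum() and len(g.strip()) > 1]
--
--     if not filtered:
--         return "Unknown"
--
--     # Check naming conventions for species
--     if all(g.isupper() for g in filtered):
--         return "Homo sapiens"
--     if all(g[0].isupper() and g[1:].islower() for g in filtered):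
--         return "Mus musculus"
--
--     return "Unknown/ambiguous"
-- ===== SOURCE B (Python) =====
-- def _label(c):
--     # per-gene naming category: "H" = all-caps (human style), "M" = Title-case
--     # (mouse style), "N" = neither
--     if c.isupper():
--         return "H"
--     if c[0].isupper() and c[1:].islower():
--         return "M"
--     return "N"
--
--
-- def classify_species_from_genes(gene_list):
--     labels = set()
--     for g in gene_list:
--         t = g.strip()
--         c = t.replace(",", "")
--         if c.isalnum() and len(t) > 1:
--             labels.add(_label(c))
--     if not labels:
--         return "Unknown"
--     if labels == {"H"}:
--         return "Homo sapiens"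
--     if labels == {"M"}:
--         return "Mus musculus"
--     return "Unknown/ambiguous"
-- ===== Notes on version B (the rewrite author's own statement) =====
-- stated objective: alternative
-- what changed: Instead of materialising a filtered list and running two separate all() scans over it, B labels each kept gene independently with its naming category ("H" all-caps / "M" title-case / "N" neither) and accumulates the distinct labels in a set; the verdict is read off the final label set (empty -> Unknown, {H} -> Homo sapiens, {M} -> Mus musculus, otherwise ambiguous), which is correct because the H and M patterns are mutually exclusive for a single gene.
import Mathlib
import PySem

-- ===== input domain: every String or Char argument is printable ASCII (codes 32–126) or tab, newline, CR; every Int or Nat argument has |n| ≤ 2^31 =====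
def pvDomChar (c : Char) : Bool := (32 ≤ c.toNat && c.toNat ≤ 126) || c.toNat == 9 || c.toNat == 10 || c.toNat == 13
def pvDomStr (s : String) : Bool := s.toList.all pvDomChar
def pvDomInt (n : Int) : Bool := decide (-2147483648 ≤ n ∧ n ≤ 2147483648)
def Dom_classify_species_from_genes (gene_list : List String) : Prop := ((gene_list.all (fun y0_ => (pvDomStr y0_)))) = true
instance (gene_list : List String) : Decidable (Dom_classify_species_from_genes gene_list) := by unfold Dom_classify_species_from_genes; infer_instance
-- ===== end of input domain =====

-- B replaces A's filtered list plus two all() scans by labelling each kept gene with its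
-- naming category ("H"/"M"/"N") and reading the verdict off the SET of distinct labels
-- (objective: alternative decomposition; correct because H and M are per-gene exclusive).

-- ===== PORT A =====
-- shared helper for Python str.isupper()/str.islower(): true iff the string has a cased
-- character and every cased character is upper (resp. lower); exact on the ASCII domain,
-- where the cased characters are exactly the letters (isalpha).
def pvStrIsupper (cs : List Char) : Bool :=
  cs.any (fun c => PySem.Chars.isalpha c) && cs.all (fun c => !(PySem.Chars.islower c))

def pvStrIslower (cs : List Char) : Bool :=
  cs.any (fun c => PySem.Chars.isalpha c) && cs.all (fun c => !(PySem.Chars.isupper c))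

-- the cleaned form g.strip().replace(",", "")
def pvClean (g : String) : List Char :=
  PySem.Chars.replace (PySem.Chars.strip g.toList) [','] []

-- A's comprehension keep-test and value: some c if g is kept, none otherwise
def pvKeep (g : String) : Option (List Char) :=
  let c := pvClean g
  if PySem.Chars.strIsalnum c && decide (1 < (PySem.Chars.strip g.toList).length) then some c
  else none

-- g.isupper() on a kept (hence nonempty) element
def pvUpperP (c : List Char) : Bool := pvStrIsupper c

-- g[0].isupper() and g[1:].islower() on a kept (hence nonempty) element; [] unreachable
def pvMusP (c : List Char) : Bool :=
  match c with
  | c0 :: rest => PySem.Chars.isupper c0 && pvStrIslower rest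
  | [] => false

def classify_species_from_genes (gene_list : List String) : String :=
  if gene_list = [] then "Unknown"
  else
    let filtered := gene_list.filterMap pvKeep
    if filtered = [] then "Unknown"
    else if filtered.all pvUpperP then "Homo sapiens"
    else if filtered.all pvMusP then "Mus musculus"
    else "Unknown/ambiguous"

-- ===== PORT B =====
-- _label(c): per-gene category; c[0]/c[1:] are taken on the nonempty kept string, the []
-- branch is unreachable (''.isalnum() is False)
def pvLabel (c : List Char) : String :=
  if pvStrIsupper c then "H"
  else
    match c with
    | c0 :: rest => if PySem.Chars.isupper c0 && pvStrIslower rest then "M" else "N"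
    | [] => "N"

-- one iteration of B's loop: t = g.strip(); c = t.replace(",", "");
-- if c.isalnum() and len(t) > 1: labels.add(_label(c))
def pvStepB (labels : PySem.Set String) (g : String) : PySem.Set String :=
  let t := PySem.Chars.strip g.toList
  let c := PySem.Chars.replace t [','] []
  if PySem.Chars.strIsalnum c && decide (1 < t.length) then PySem.Set.add labels (pvLabel c)
  else labels

def classify_species_from_genes_alt (gene_list : List String) : String :=
  let labels := gene_list.foldl pvStepB PySem.Set.empty
  if labels = [] then "Unknown"                                    -- if not labels
  else if PySem.Set.equal labels ["H"] then "Homo sapiens"          -- labels == {"H"}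
  else if PySem.Set.equal labels ["M"] then "Mus musculus"          -- labels == {"M"}
  else "Unknown/ambiguous"

-- ===== PRECONDITION & SPEC =====
def Spec_classify_species_from_genes (gene_list : List String) (out : String) : Prop := out = classify_species_from_genes_alt gene_list
instance (gene_list : List String) (out : String) : Decidable (Spec_classify_species_from_genes gene_list out) := by unfold Spec_classify_species_from_genes; infer_instance

-- ===== CLAIM (what is proved, stated in full; the proofs are below) =====
def Claim_equal_classify_species_from_genes : Prop := ∀ (gene_list : List String), Dom_classify_species_from_genes gene_list → Spec_classify_species_from_genes gene_list (classify_species_from_genes gene_list)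

-- ===== LEMMAS AND PROOFS =====

-- a string matching the Mus pattern is never all-uppercase (its tail has a lowercase letter)
theorem pvMus_not_upper (c : List Char) (h : pvMusP c = true) : pvStrIsupper c = false := by
  match c with
  | [] => simp [pvMusP] at h
  | c0 :: rest =>
    simp only [pvMusP, Bool.and_eq_true] at h
    obtain ⟨_, hlow⟩ := h
    simp only [pvStrIslower, Bool.and_eq_true, List.any_eq_true, List.all_eq_true] at hlow
    obtain ⟨⟨a, ha, halpha⟩, hnoup⟩ := hlow
    have hnu : ¬ PySem.Chars.isupper a = true := by
      have := hnoup a ha; simpa using this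
    have hlo : PySem.Chars.islower a = true := by
      simp only [PySem.Chars.isalpha, Bool.or_eq_true] at halpha
      tauto
    simp only [pvStrIsupper, Bool.and_eq_false_iff]
    right
    simp only [List.all_eq_false]
    refine ⟨a, List.mem_cons_of_mem _ ha, by simp [hlo]⟩

theorem pvLabel_eq_H (c : List Char) : pvLabel c = "H" ↔ pvStrIsupper c = true := by
  cases c with
  | nil => unfold pvLabel; split_ifs with h <;> simp [h]
  | cons c0 rest =>
    unfold pvLabel
    split_ifs with h
    · simp [h]
    · have hne : (if PySem.Chars.isupper c0 = true ∧ pvStrIslower rest = true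
          then "M" else "N") ≠ "H" := by split <;> simp
      simp [h, hne]

theorem pvLabel_eq_M (c : List Char) : pvLabel c = "M" ↔ (pvStrIsupper c = false ∧ pvMusP c = true) := by
  cases c with
  | nil => unfold pvLabel; split_ifs with h <;> simp [h, pvMusP]
  | cons c0 rest =>
    unfold pvLabel
    split_ifs with h <;> simp_all [pvMusP]

-- B's loop condition is A's keep-test; membership in the accumulated label set
theorem pvStep_mem (xs : List String) : ∀ (s : PySem.Set String) (x : String),
    x ∈ xs.foldl pvStepB s ↔ x ∈ s ∨ ∃ c ∈ xs.filterMap pvKeep, x = pvLabel c := by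
  induction xs with
  | nil => simp
  | cons g xs ih =>
    intro s x
    simp only [List.foldl_cons, List.filterMap_cons]
    by_cases h : (PySem.Chars.strIsalnum (pvClean g) &&
        decide (1 < (PySem.Chars.strip g.toList).length)) = true
    · have hk : pvKeep g = some (pvClean g) := by simp [pvKeep, h]
      have hs : pvStepB s g = PySem.Set.add s (pvLabel (pvClean g)) := by
        simp only [pvStepB, pvClean] at *; simp [h]
      rw [hs, hk, ih]
      simp only [PySem.Set.mem_add, List.mem_cons]
      constructor
      · rintro (⟨hx | hx⟩ | ⟨c, hc, rfl⟩)
        · exact Or.inl hx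
        · exact Or.inr ⟨pvClean g, Or.inl rfl, hx⟩
        · exact Or.inr ⟨c, Or.inr hc, rfl⟩
      · rintro (hx | ⟨c, (rfl | hc), rfl⟩)
        · exact Or.inl (Or.inl hx)
        · exact Or.inl (Or.inr rfl)
        · exact Or.inr ⟨c, hc, rfl⟩
    · have hk : pvKeep g = none := by simp [pvKeep, h]
      have hs : pvStepB s g = s := by
        simp only [pvStepB, pvClean] at *; simp [h]
      rw [hs, hk, ih]

-- ===== VERDICT (by name: the statement is the Claim_ definition above) =====
theorem classify_species_from_genes_spec : Claim_equal_classify_species_from_genes := by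
  intro gene_list _
  show classify_species_from_genes gene_list = classify_species_from_genes_alt gene_list
  unfold classify_species_from_genes classify_species_from_genes_alt
  simp only [PySem.Set.empty]
  have hmem := pvStep_mem gene_list []
  simp only [List.not_mem_nil, false_or] at hmem
  by_cases hnil : gene_list = []
  · subst hnil; simp
  · simp only [hnil, if_false]
    rcases hFnil : gene_list.filterMap pvKeep with _ | ⟨c0, F'⟩ <;> rw [hFnil] at hmem
    · have hSnil : gene_list.foldl pvStepB [] = [] := by
        rw [List.eq_nil_iff_forall_not_mem]
        intro x hx
        rcases (hmem x).1 hx with ⟨c, hc, _⟩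
        simp at hc
      simp [hSnil]
    · have hc0 : c0 ∈ c0 :: F' := List.mem_cons_self
      have hSne : gene_list.foldl pvStepB [] ≠ [] := by
        intro h
        exact absurd ((hmem (pvLabel c0)).2 ⟨c0, hc0, rfl⟩) (by simp [h])
      simp only [hSne, if_false, reduceCtorEq]
      by_cases hu : (c0 :: F').all pvUpperP = true
      · -- every kept gene is all-uppercase: labels = {"H"}
        have hH : PySem.Set.equal (gene_list.foldl pvStepB []) ["H"] = true := by
          rw [PySem.Set.equal_iff]
          intro x
          rw [hmem x]
          simp only [List.mem_singleton]
          constructor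
          · rintro ⟨c, hc, rfl⟩
            exact (pvLabel_eq_H c).2 (by simpa [pvUpperP] using List.all_eq_true.1 hu c hc)
          · rintro rfl
            exact ⟨c0, hc0, ((pvLabel_eq_H c0).2
              (by simpa [pvUpperP] using List.all_eq_true.1 hu c0 hc0)).symm⟩
        simp [hu, hH]
      · -- some kept gene is not all-uppercase: labels ≠ {"H"}
        obtain ⟨c1, hc1, hc1u⟩ : ∃ c ∈ c0 :: F', pvStrIsupper c = false := by
          rcases List.all_eq_false.1 (Bool.eq_false_iff.mpr hu) with ⟨c, hc, hcu⟩
          exact ⟨c, hc, by simpa [pvUpperP] using hcu⟩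
        have hnotH : PySem.Set.equal (gene_list.foldl pvStepB []) ["H"] = false := by
          rw [Bool.eq_false_iff]
          intro h
          have hiff := (PySem.Set.equal_iff _ _).1 h (pvLabel c1)
          rw [hmem] at hiff
          have hmemH : pvLabel c1 ∈ (["H"] : List String) := hiff.1 ⟨c1, hc1, rfl⟩
          simp only [List.mem_singleton] at hmemH
          rw [pvLabel_eq_H] at hmemH
          simp [hc1u] at hmemH
        simp only [hu, if_false, Bool.false_eq_true, hnotH]
        by_cases hm : (c0 :: F').all pvMusP = true
        · -- every kept gene matches the Mus pattern: labels = {"M"}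
          have hM : PySem.Set.equal (gene_list.foldl pvStepB []) ["M"] = true := by
            rw [PySem.Set.equal_iff]
            intro x
            rw [hmem x]
            simp only [List.mem_singleton]
            constructor
            · rintro ⟨c, hc, rfl⟩
              have hmc := List.all_eq_true.1 hm c hc
              exact (pvLabel_eq_M c).2 ⟨pvMus_not_upper c hmc, hmc⟩
            · rintro rfl
              have hmc := List.all_eq_true.1 hm c1 hc1
              exact ⟨c1, hc1, ((pvLabel_eq_M c1).2 ⟨hc1u, hmc⟩).symm⟩
          simp [hm, hM]
        · -- some kept gene matches neither: its label is not "M", so labels ≠ {"M"}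
          obtain ⟨c2, hc2, hc2m⟩ := List.all_eq_false.1 (Bool.eq_false_iff.mpr hm)
          have hnotM : PySem.Set.equal (gene_list.foldl pvStepB []) ["M"] = false := by
            rw [Bool.eq_false_iff]
            intro h
            have hiff := (PySem.Set.equal_iff _ _).1 h (pvLabel c2)
            rw [hmem] at hiff
            have hmemM : pvLabel c2 ∈ (["M"] : List String) := hiff.1 ⟨c2, hc2, rfl⟩
            simp only [List.mem_singleton] at hmemM
            rw [pvLabel_eq_M] at hmemM
            simp [hc2m] at hmemM
          simp [hm, hnotM]
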